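-- pv_equiv track=rewrite | github.com/adi271001/POTD | Gfg/Maximum-Intersecting-Lines.py | maxIntersections
-- ===== SOURCE A (Python) =====
-- def maxIntersections(lines, N):
--     # Code here
--     arr = {}
--     for k in range(N):
--         arr[lines[k][0]] = arr.get(lines[k][0],0)+1
--         arr[lines[k][1]+1] = arr.get(lines[k][1]+1,0)-1
--     a = 0
--     t = 0
--     for k in sorted(arr):
--         t += arr[k]
--         a = max(a,t)
--     return a
-- ===== SOURCE B (Python) =====
-- def maxIntersections(lines, N):
--     starts = sorted(lines[k][0] for k in range(N))
--     ends = sorted(lines[k][1] for k in range(N))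
--     n = len(starts)
--     i = j = count = best = 0
--     while i < n:
--         if j < n and ends[j] < starts[i]:
--             count -= 1
--             j += 1
--         else:
--             count += 1
--             if count > best:
--                 best = count
--             i += 1
--     return best
-- ===== Notes on version B (the rewrite author's own statement) =====
-- stated objective: alternative
-- what changed: Replaced the coordinate-keyed difference dictionary and its sorted-key prefix-sum sweep by the meeting-rooms formulation: sort the start coordinates and the end coordinates separately and run a two-pointer sweep with a running count.
import Mathlib
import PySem

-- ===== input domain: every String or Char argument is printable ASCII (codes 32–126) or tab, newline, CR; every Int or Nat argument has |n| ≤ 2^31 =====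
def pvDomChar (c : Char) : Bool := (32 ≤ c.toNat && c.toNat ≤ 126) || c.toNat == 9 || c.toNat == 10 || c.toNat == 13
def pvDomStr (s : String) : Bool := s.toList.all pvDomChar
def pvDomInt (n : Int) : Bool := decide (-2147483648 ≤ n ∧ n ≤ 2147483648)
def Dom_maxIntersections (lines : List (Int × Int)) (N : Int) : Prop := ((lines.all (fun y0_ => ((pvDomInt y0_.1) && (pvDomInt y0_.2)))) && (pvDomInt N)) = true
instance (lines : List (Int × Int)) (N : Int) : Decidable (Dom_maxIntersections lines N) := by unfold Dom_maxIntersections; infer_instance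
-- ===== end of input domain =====

-- B replaces A's coordinate-keyed difference dictionary + sorted-key prefix-sum sweep by the
-- meeting-rooms two-pointer sweep over separately sorted start and end lists (objective: alternative).

-- ===== PORT A =====
def maxIntersections (lines : List (Int × Int)) (N : Int) : Int :=
  let arr := (PySem.List.pyRange 0 N).foldl
    (fun (d : PySem.Dict Int Int) k =>
      let p := PySem.List.pyGetD lines k (0, 0)
      let d := d.insert p.1 (d.getD p.1 0 + 1)
      d.insert (p.2 + 1) (d.getD (p.2 + 1) 0 - 1))
    PySem.Dict.empty
  let s := (PySem.List.sorted arr.keys (fun x => x)).foldl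
    (fun (s : Int × Int) k =>
      let t := s.2 + arr.getD k 0
      (max s.1 t, t))
    (0, 0)
  s.1

-- ===== PORT B =====
-- the 'while i < n' loop of Source B (state i, j, count, best)
def pvSweep (starts ends : List Int) (i j : Nat) (count best : Int) : Int :=
  if hi : i < starts.length then
    if hj : j < starts.length ∧ PySem.List.pyGetD ends (j : Int) 0 < PySem.List.pyGetD starts (i : Int) 0 then
      pvSweep starts ends i (j + 1) (count - 1) best
    else
      let c := count + 1
      pvSweep starts ends (i + 1) j c (if c > best then c else best)
  else best
termination_by (starts.length - i) + (starts.length - j)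
decreasing_by
  · omega
  · omega

def maxIntersections_alt (lines : List (Int × Int)) (N : Int) : Int :=
  let starts := PySem.List.sorted ((PySem.List.pyRange 0 N).map (fun k => (PySem.List.pyGetD lines k (0, 0)).1)) (fun x => x)
  let ends := PySem.List.sorted ((PySem.List.pyRange 0 N).map (fun k => (PySem.List.pyGetD lines k (0, 0)).2)) (fun x => x)
  pvSweep starts ends 0 0 0 0

-- ===== PRECONDITION & SPEC =====
-- Pre_ excludes exactly the inputs where A raises IndexError: lines[k] with N > len(lines).
def Pre_maxIntersections (lines : List (Int × Int)) (N : Int) : Prop := N ≤ (lines.length : Int)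
instance (lines : List (Int × Int)) (N : Int) : Decidable (Pre_maxIntersections lines N) := by unfold Pre_maxIntersections; infer_instance

def pvWitness_maxIntersections : (List (Int × Int)) × Int := ([(1, 3), (2, 5)], 2)

def Spec_maxIntersections (lines : List (Int × Int)) (N : Int) (out : Int) : Prop := out = maxIntersections_alt lines N
instance (lines : List (Int × Int)) (N : Int) (out : Int) : Decidable (Spec_maxIntersections lines N out) := by unfold Spec_maxIntersections; infer_instance

-- ===== CLAIM (what is proved, stated in full; the proofs are below) =====
def Claim_equal_maxIntersections : Prop := ∀ (lines : List (Int × Int)) (N : Int), Dom_maxIntersections lines N → Pre_maxIntersections lines N → Spec_maxIntersections lines N (maxIntersections lines N)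

-- ===== LEMMAS AND PROOFS =====

-- number of elements of L that are ≤ x / < x (as an Int)
def cntLe (L : List Int) (x : Int) : Int := (L.countP (fun y => y ≤ x) : Int)
def cntLt (L : List Int) (x : Int) : Int := (L.countP (fun y => y < x) : Int)
-- signed coverage at point x of the intervals with starts S and shifted ends E1 (= ends + 1)
def pvF (S E1 : List Int) (x : Int) : Int := cntLe S x - cntLe E1 x
-- sum of v over a key list
def sumv (v : Int → Int) (K : List Int) : Int := (K.map v).sum
-- the body of A's first loop, over the extracted pair
def stepA (d : PySem.Dict Int Int) (p : Int × Int) : PySem.Dict Int Int :=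
  let d := d.insert p.1 (d.getD p.1 0 + 1)
  d.insert (p.2 + 1) (d.getD (p.2 + 1) 0 - 1)

lemma dictA_getD (L : List (Int × Int)) (d : PySem.Dict Int Int) (x : Int) :
    (L.foldl stepA d).getD x 0 =
      d.getD x 0 + ((L.map Prod.fst).count x : Int) - ((L.map (fun p => p.2 + 1)).count x : Int) := by
  induction L generalizing d with
  | nil => simp
  | cons p t ih =>
      simp only [List.foldl_cons, List.map_cons, ih, stepA, PySem.Dict.getD_insert, List.count_cons]
      by_cases h1 : x = p.1 <;> by_cases h2 : x = p.2 + 1 <;>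
        simp [h1, h2] <;> omega

lemma dictA_nodup (L : List (Int × Int)) (d : PySem.Dict Int Int) (h : d.keys.Nodup) :
    (L.foldl stepA d).keys.Nodup := by
  induction L generalizing d with
  | nil => exact h
  | cons p t ih =>
      exact ih _ (PySem.Dict.nodup_keys_insert _ _ _ (PySem.Dict.nodup_keys_insert _ _ _ h))

lemma dictA_mem (L : List (Int × Int)) (d : PySem.Dict Int Int) (x : Int) :
    x ∈ (L.foldl stepA d).keys ↔ x ∈ d.keys ∨ x ∈ L.map Prod.fst ∨ x ∈ L.map (fun p => p.2 + 1) := by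
  induction L generalizing d with
  | nil => simp
  | cons p t ih =>
      simp only [List.foldl_cons, ih, stepA, PySem.Dict.mem_keys_insert, List.map_cons, List.mem_cons]
      tauto

lemma cntLe_mono (L : List Int) {x y : Int} (h : x ≤ y) : cntLe L x ≤ cntLe L y := by
  unfold cntLe
  exact_mod_cast List.countP_mono_left (fun a _ ha => by simp_all; omega)

lemma cntLt_mono (L : List Int) {x y : Int} (h : x ≤ y) : cntLt L x ≤ cntLt L y := by
  unfold cntLt
  exact_mod_cast List.countP_mono_left (fun a _ ha => by simp_all; omega)

lemma foldl_max_le {α : Type} (h : α → Int) (L : List α) (c init : Int) (h0 : init ≤ c)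
    (hx : ∀ x ∈ L, h x ≤ c) : L.foldl (fun a x => max a (h x)) init ≤ c := by
  induction L generalizing init with
  | nil => simpa using h0
  | cons y t ih =>
      simp only [List.foldl_cons]
      exact ih _ (by simp [h0, hx y (by simp)]) (fun x hx' => hx x (by simp [hx']))

lemma countP_le_of_getD_gt (es : List Int) (p : Int → Bool)
    (hmono : ∀ a b : Int, a ≤ b → p b → p a) (j : Nat)
    (hs : es.Pairwise (· ≤ ·)) (hjlen : j < es.length) (hval : ¬ p (es.getD j 0)) :
    es.countP p ≤ j := by
  have hsplit : es = es.take j ++ es.drop j := (List.take_append_drop j es).symm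
  conv_lhs => rw [hsplit]
  rw [List.countP_append]
  have h1 : (es.take j).countP p ≤ j := by
    calc (es.take j).countP _ ≤ (es.take j).length := List.countP_le_length
      _ ≤ j := by simp [List.length_take]
  have h2 : (es.drop j).countP p = 0 := by
    rw [List.countP_eq_zero]
    intro e he
    obtain ⟨k, hk, rfl⟩ := List.mem_iff_getElem.mp he
    have hkj : j + k < es.length := by
      have := hk; simp [List.length_drop] at this; omega
    have hdk : (es.drop j)[k] = es[j + k] := by
      rw [List.getElem_drop]
    have hle : es[j] ≤ es[j + k] := by
      rcases Nat.eq_or_lt_of_le (Nat.le_add_right j k) with h | h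
      · simp [← h]
      · exact List.pairwise_iff_getElem.mp hs j (j+k) hjlen hkj h
    have hdj : es.getD j 0 = es[j] := List.getD_eq_getElem es 0 hjlen
    rw [hdk]
    cases hpb : p es[j + k] with
    | false => simp
    | true => exact fun _ => hval (by rw [hdj]; exact hmono _ _ hle hpb)
  omega

lemma countP_lt_of_sorted (es : List Int) (x : Int) (j : Nat) (hj : j ≤ es.length)
    (hs : es.Pairwise (· ≤ ·))
    (hlow : ∀ j' < j, es.getD j' 0 < x)
    (hhigh : j < es.length → ¬ es.getD j 0 < x) :
    (es.countP (fun e => e < x) : Int) = (j : Int) := by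
  have hge : j ≤ es.countP (fun e => e < x) := by
    -- the first j elements all satisfy
    have : (es.take j).countP (fun e => e < x) = j := by
      rw [List.countP_eq_length.mpr]
      · simp [List.length_take]; omega
      · intro e he
        obtain ⟨k, hk, rfl⟩ := List.mem_iff_getElem.mp he
        have hkj : k < j := by simp [List.length_take] at hk; omega
        have hkl : k < es.length := by omega
        have := hlow k hkj
        rw [List.getElem_take]
        rw [List.getD_eq_getElem es 0 hkl] at this
        simpa using this
    calc j = (es.take j).countP (fun e => e < x) := this.symm
      _ ≤ es.countP (fun e => e < x) := by
          conv_rhs => rw [← List.take_append_drop j es]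
          rw [List.countP_append]; omega
  rcases Nat.lt_or_ge j es.length with h | h
  · have := countP_le_of_getD_gt es (fun e => e < x) (fun a b hab hb => by simp at *; omega) j hs h (by simpa using hhigh h)
    omega
  · have hje : j = es.length := by omega
    have : es.countP (fun e => e < x) ≤ es.length := List.countP_le_length
    omega

lemma sorted_prefix_le (ss : List Int) (s : Int) (hss : ss.Pairwise (· ≤ ·)) (idx : Nat)
    (h : idx < ss.countP (fun y => y ≤ s)) : ss.getD idx 0 ≤ s := by
  by_contra hgt
  rw [Int.not_le] at hgt
  have hidx : idx < ss.length := lt_of_lt_of_le h List.countP_le_length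
  have := countP_le_of_getD_gt ss (fun y => y ≤ s) (fun a b hab hb => by simp at *; omega) idx hss hidx (by simpa using hgt)
  omega

lemma pvF_le_best (S E1 L : List Int) (hSL : ∀ s ∈ S, s ∈ L) (x : Int) :
    pvF S E1 x ≤ L.foldl (fun a s => max a (pvF S E1 s)) 0 := by
  have h0 : (0:Int) ≤ L.foldl (fun a s => max a (pvF S E1 s)) 0 := (PySem.List.le_foldl_max_int L _ 0).1
  rcases hmax : PySem.List.max? (S.filter (fun s => s ≤ x)) (fun y => y) with _ | m
  · -- no start ≤ x : pvF x ≤ 0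
    have : S.filter (fun s => s ≤ x) = [] := (PySem.List.max?_eq_none_iff _ _).mp hmax
    have hc : S.countP (fun s => s ≤ x) = 0 := by
      rw [List.countP_eq_zero]
      intro s hsm
      by_contra hb
      have hmem : s ∈ S.filter (fun s => s ≤ x) := List.mem_filter.mpr ⟨hsm, by simpa using hb⟩
      rw [this] at hmem; simp at hmem
    have : pvF S E1 x ≤ 0 := by
      unfold pvF cntLe; rw [hc]; omega
    omega
  · have hmem := PySem.List.max?_mem hmax
    have hmf := List.mem_filter.mp hmem
    have hmx : m ≤ x := by simpa using hmf.2
    have hmax' := PySem.List.max?_isMax hmax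
    have h1 : cntLe S x = cntLe S m := by
      unfold cntLe
      congr 1
      apply le_antisymm
      · apply List.countP_mono_left
        intro s hsm hsx
        have : s ∈ S.filter (fun s => s ≤ x) := List.mem_filter.mpr ⟨hsm, by simpa using hsx⟩
        simpa using hmax' s this
      · exact List.countP_mono_left (fun s _ hsm => by simp at *; omega)
    have h2 : pvF S E1 x ≤ pvF S E1 m := by
      unfold pvF
      have := cntLe_mono E1 hmx
      omega
    have h3 : pvF S E1 m ≤ L.foldl (fun a s => max a (pvF S E1 s)) 0 :=
      (PySem.List.le_foldl_max_int L _ 0).2 m (hSL m hmf.1)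
    omega

lemma sum_count_filter (K S : List Int) (x : Int) (hnd : K.Nodup) (hSK : ∀ s ∈ S, s ∈ K) :
    ((K.filter (fun y => y ≤ x)).map (fun y => (S.count y : Int))).sum = cntLe S x := by
  induction S with
  | nil => simp [cntLe]
  | cons s t ih =>
      have ht : ∀ s' ∈ t, s' ∈ K := fun s' hs' => hSK s' (by simp [hs'])
      have hs : s ∈ K := hSK s (by simp)
      have hsplit : ∀ y : Int, ((s :: t).count y : Int) = (t.count y : Int) + (if y = s then 1 else 0) := by
        intro y; rw [List.count_cons]; by_cases h : y = s
        · simp [h]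
        · have h' : ¬ s = y := fun hc => h hc.symm
          simp [h, h']
      calc ((K.filter (fun y => y ≤ x)).map (fun y => ((s :: t).count y : Int))).sum
          = ((K.filter (fun y => y ≤ x)).map (fun y => (t.count y : Int) + (if y = s then 1 else 0))).sum := by
            congr 1; exact List.map_congr_left (fun y _ => hsplit y)
        _ = ((K.filter (fun y => y ≤ x)).map (fun y => (t.count y : Int))).sum
            + ((K.filter (fun y => y ≤ x)).map (fun y => (if y = s then 1 else 0 : Int))).sum := by
            rw [PySem.List.sum_map_add_int]
        _ = cntLe t x + (if s ≤ x then 1 else 0) := by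
            rw [ih ht]; congr 1
            have hnd' : (K.filter (fun y => y ≤ x)).Nodup := hnd.filter _
            by_cases hsx : s ≤ x
            · have hmem : s ∈ K.filter (fun y => y ≤ x) := by
                simp [List.mem_filter, hs, hsx]
              -- sum of indicator over a nodup list containing s once
              have hc := List.count_eq_one_of_mem hnd' hmem
              have hone : ((K.filter (fun y => y ≤ x)).map (fun y => (if y = s then 1 else 0 : Int))).sum = 1 := by
                calc ((K.filter (fun y => y ≤ x)).map (fun y => (if y = s then 1 else 0 : Int))).sum
                    = (((K.filter (fun y => y ≤ x)).countP (fun y => y == s) : Nat) : Int) := by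
                      rw [← PySem.List.sum_map_ite_one_zero (fun y => y == s)]
                      congr 1; exact List.map_congr_left (fun y _ => by by_cases h : y = s <;> simp [h])
                  _ = 1 := by
                      rw [show ((K.filter (fun y => y ≤ x)).countP (fun y => y == s)) = List.count s (K.filter (fun y => y ≤ x)) from rfl, hc]; simp
              rw [hone]; simp [hsx]
            · have hnot : s ∉ K.filter (fun y => y ≤ x) := by simp [List.mem_filter, hsx]
              have : ((K.filter (fun y => y ≤ x)).map (fun y => (if y = s then 1 else 0 : Int))).sum = 0 := by
                apply List.sum_eq_zero; intro z hz
                simp only [List.mem_map] at hz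
                obtain ⟨y, hy, rfl⟩ := hz
                have : y ≠ s := fun h => hnot (h ▸ hy)
                simp [this]
              rw [this]; simp [hsx]
        _ = cntLe (s :: t) x := by
            unfold cntLe; rw [List.countP_cons]; by_cases h : s ≤ x <;> simp [h]

lemma sweepA_eq (v : Int → Int) (K Kp : List Int) (a : Int)
    (hK : (Kp ++ K).Pairwise (· < ·)) :
    (K.foldl (fun (s : Int × Int) k => (max s.1 (s.2 + v k), s.2 + v k)) (a, sumv v Kp)).1 =
      K.foldl (fun a' k => max a' (sumv v ((Kp ++ K).filter (fun y => y ≤ k)))) a := by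
  induction K generalizing Kp a with
  | nil => simp
  | cons k K' ih =>
      have hfilter : (Kp ++ k :: K').filter (fun y => y ≤ k) = Kp ++ [k] := by
        rw [List.filter_append]
        have h1 : Kp.filter (fun y => y ≤ k) = Kp := by
          rw [List.filter_eq_self]
          intro y hy
          have : y < k := (List.pairwise_append.mp hK).2.2 y hy k (by simp)
          simpa using le_of_lt this
        have h2 : (k :: K').filter (fun y => y ≤ k) = [k] := by
          have hK' : (k :: K').Pairwise (· < ·) := (List.pairwise_append.mp hK).2.1
          rw [List.filter_cons_of_pos (by simp)]
          have : K'.filter (fun y => y ≤ k) = [] := by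
            rw [List.filter_eq_nil_iff]
            intro y hy
            have : k < y := (List.pairwise_cons.mp hK').1 y hy
            simpa using this
          rw [this]
        rw [h1, h2]
      have hKp' : ((Kp ++ [k]) ++ K').Pairwise (· < ·) := by
        simpa using hK
      have hsum : sumv v Kp + v k = sumv v (Kp ++ [k]) := by
        simp [sumv]
      simp only [List.foldl_cons]
      rw [hfilter]
      calc (K'.foldl (fun (s : Int × Int) k => (max s.1 (s.2 + v k), s.2 + v k))
              (max a (sumv v Kp + v k), sumv v Kp + v k)).1
          = (K'.foldl (fun (s : Int × Int) k => (max s.1 (s.2 + v k), s.2 + v k))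
              (max a (sumv v (Kp ++ [k])), sumv v (Kp ++ [k]))).1 := by rw [hsum]
        _ = K'.foldl (fun a' k' => max a' (sumv v (((Kp ++ [k]) ++ K').filter (fun y => y ≤ k'))))
              (max a (sumv v (Kp ++ [k]))) := ih (Kp ++ [k]) _ hKp'
        _ = K'.foldl (fun a' k' => max a' (sumv v ((Kp ++ k :: K').filter (fun y => y ≤ k'))))
              (max a (sumv v (Kp ++ [k]))) := by
            congr 1
            funext a' k'
            congr 2
            simp

lemma sorted_countLe_ge (ss : List Int) (hss : ss.Pairwise (· ≤ ·)) (i' : Nat) (hi' : i' < ss.length) :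
    (i' : Int) + 1 ≤ cntLe ss (ss.getD i' 0) := by
  unfold cntLe
  set x := ss.getD i' 0 with hx
  have : (ss.take (i'+1)).countP (fun y => y ≤ x) = i' + 1 := by
    rw [List.countP_eq_length.mpr]
    · simp [List.length_take]; omega
    · intro e he
      obtain ⟨k, hk, rfl⟩ := List.mem_iff_getElem.mp he
      have hkj : k ≤ i' := by simp [List.length_take] at hk; omega
      have hkl : k < ss.length := by omega
      rw [List.getElem_take, hx, List.getD_eq_getElem ss 0 hi']
      rcases Nat.eq_or_lt_of_le hkj with h | h
      · simp [h]
      · have := List.pairwise_iff_getElem.mp hss k i' hkl hi' h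
        simpa using this
  have hle : (i'+1 : Nat) ≤ ss.countP (fun y => y ≤ x) := by
    conv_rhs => rw [← List.take_append_drop (i'+1) ss]
    rw [List.countP_append]
    omega
  exact_mod_cast hle

lemma idxmax_eq_elemmax (ss es : List Int) (hss : ss.Pairwise (· ≤ ·)) :
    (List.range' 0 ss.length).foldl
        (fun b (i' : Nat) => max b ((i' : Int) + 1 - cntLt es (ss.getD i' 0))) 0 =
      ss.foldl (fun a s => max a (cntLe ss s - cntLt es s)) 0 := by
  apply le_antisymm
  · apply foldl_max_le _ _ _ _ ((PySem.List.le_foldl_max_int ss _ 0).1)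
    intro i' hi'
    have hilt : i' < ss.length := by
      have := List.mem_range'_1.mp hi'; omega
    have h1 := sorted_countLe_ge ss hss i' hilt
    have hmem : ss.getD i' 0 ∈ ss := by
      rw [List.getD_eq_getElem ss 0 hilt]; exact List.getElem_mem _
    have h2 := (PySem.List.le_foldl_max_int ss (fun s => cntLe ss s - cntLt es s) 0).2 _ hmem
    omega
  · apply foldl_max_le _ _ _ _ ((PySem.List.le_foldl_max_int (List.range' 0 ss.length) _ 0).1)
    intro s hs
    have hc1 : 0 < ss.countP (fun y => y ≤ s) := List.countP_pos_iff.mpr ⟨s, hs, by simp⟩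
    have hcle : ss.countP (fun y => y ≤ s) ≤ ss.length := List.countP_le_length
    set c := ss.countP (fun y => y ≤ s) with hc
    have hlt : c - 1 < ss.length := by omega
    have hle : ss.getD (c-1) 0 ≤ s := sorted_prefix_le ss s hss (c-1) (by omega)
    have hmono := cntLt_mono es hle
    have hmem : (c-1) ∈ List.range' 0 ss.length := List.mem_range'_1.mpr ⟨by omega, by omega⟩
    have h2 := (PySem.List.le_foldl_max_int (List.range' 0 ss.length)
        (fun (i' : Nat) => (i' : Int) + 1 - cntLt es (ss.getD i' 0)) 0).2 _ hmem
    have hcast : ((c - 1 : Nat) : Int) = (c : Int) - 1 := by omega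
    unfold cntLe
    rw [← hc]
    omega

lemma pyRange_extract (lines : List (Int × Int)) (N : Int) (h : N ≤ (lines.length : Int)) :
    (PySem.List.pyRange 0 N).map (fun k => PySem.List.pyGetD lines k (0, 0)) = lines.take N.toNat := by
  rcases (by omega : N ≤ 0 ∨ 0 < N) with hN | hN
  · have h1 : PySem.List.pyRange 0 N = [] := by
      simp [PySem.List.pyRange]
      omega
    rw [h1, Int.toNat_of_nonpos hN]
    simp
  · have hN' : N = (N.toNat : Int) := (Int.toNat_of_nonneg (le_of_lt hN)).symm
    rw [hN', PySem.List.pyRange_zero_natCast, List.map_map]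
    have hlen : N.toNat ≤ lines.length := by omega
    apply List.ext_getElem
    · simp [List.length_take]; omega
    · intro i h1 h2
      simp only [List.getElem_map, List.getElem_range, Function.comp_apply, List.getElem_take]
      rw [PySem.List.pyGetD_natCast]
      simp at h1
      rw [List.getD_eq_getElem lines (0,0) (by omega)]

lemma sweep_eq (ss es : List Int) (hss : ss.Pairwise (· ≤ ·)) (hes : es.Pairwise (· ≤ ·))
    (hlen : es.length = ss.length) (i j : Nat) (count best : Int)
    (hi : i ≤ ss.length) (hj : j ≤ ss.length)
    (hcount : count = (i : Int) - (j : Int))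
    (hpass : i < ss.length → ∀ j' < j, es.getD j' 0 < ss.getD i 0) :
    pvSweep ss es i j count best =
      (List.range' i (ss.length - i)).foldl
        (fun b (i' : Nat) => max b ((i' : Int) + 1 - cntLt es (ss.getD i' 0))) best := by
  rw [pvSweep]
  by_cases hilt : i < ss.length
  · rw [dif_pos hilt]
    have hjget : PySem.List.pyGetD es (j : Int) 0 = es.getD j 0 := PySem.List.pyGetD_natCast es j 0
    have higet : PySem.List.pyGetD ss (i : Int) 0 = ss.getD i 0 := PySem.List.pyGetD_natCast ss i 0
    by_cases hcond : j < ss.length ∧ PySem.List.pyGetD es (j : Int) 0 < PySem.List.pyGetD ss (i : Int) 0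
    · rw [dif_pos hcond]
      apply sweep_eq ss es hss hes hlen i (j+1) _ best hi (by omega) (by push_cast; omega)
      intro _ j' hj'
      rcases Nat.lt_or_ge j' j with h | h
      · exact hpass hilt j' h
      · have : j' = j := by omega
        subst this
        rw [← hjget, ← higet]; exact hcond.2
    · rw [dif_neg hcond]
      have hcnt : cntLt es (ss.getD i 0) = (j : Int) := by
        apply countP_lt_of_sorted es _ j (by omega) hes (hpass hilt)
        intro hjlt
        have : ¬ (j < ss.length ∧ PySem.List.pyGetD es (j : Int) 0 < PySem.List.pyGetD ss (i : Int) 0) := hcond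
        rw [hjget, higet] at this
        intro hb
        exact this ⟨by omega, hb⟩
      have hrange : List.range' i (ss.length - i) = i :: List.range' (i+1) (ss.length - (i+1)) := by
        have : ss.length - i = (ss.length - (i+1)) + 1 := by omega
        rw [this, List.range'_succ]
      rw [hrange, List.foldl_cons]
      have hbest : (if count + 1 > best then count + 1 else best) = max best ((i : Int) + 1 - cntLt es (ss.getD i 0)) := by
        rw [hcnt, max_def]
        split_ifs <;> omega
      show pvSweep ss es (i + 1) j (count + 1) (if count + 1 > best then count + 1 else best) = _
      rw [hbest]
      apply sweep_eq ss es hss hes hlen (i+1) j _ _ (by omega) hj (by push_cast; omega)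
      intro hi1 j' hj'
      have h1 : es.getD j' 0 < ss.getD i 0 := hpass hilt j' hj'
      have h2 : ss.getD i 0 ≤ ss.getD (i+1) 0 := by
        rw [List.getD_eq_getElem ss 0 hilt, List.getD_eq_getElem ss 0 hi1]
        exact List.pairwise_iff_getElem.mp hss i (i+1) hilt hi1 (by omega)
      omega
  · rw [dif_neg hilt]
    have : ss.length - i = 0 := by omega
    rw [this]
    simp
termination_by (ss.length - i) + (ss.length - j)
decreasing_by
  · omega
  · omega

lemma best_congr (S E1 L M : List Int)
    (hL : ∀ x ∈ L, pvF S E1 x ≤ M.foldl (fun a s => max a (pvF S E1 s)) 0)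
    (hM : ∀ x ∈ M, pvF S E1 x ≤ L.foldl (fun a s => max a (pvF S E1 s)) 0) :
    L.foldl (fun a s => max a (pvF S E1 s)) 0 = M.foldl (fun a s => max a (pvF S E1 s)) 0 := by
  apply le_antisymm
  · exact foldl_max_le _ _ _ _ ((PySem.List.le_foldl_max_int M _ 0).1) hL
  · exact foldl_max_le _ _ _ _ ((PySem.List.le_foldl_max_int L _ 0).1) hM

lemma thmA (lines : List (Int × Int)) (N : Int) (h : N ≤ (lines.length : Int)) :
    maxIntersections lines N =
      (lines.take N.toNat |>.map Prod.fst).foldl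
        (fun a s => max a (pvF (lines.take N.toNat |>.map Prod.fst)
                               (lines.take N.toNat |>.map (fun p => p.2 + 1)) s)) 0 := by
  set P := lines.take N.toNat with hP
  set S := P.map Prod.fst with hS
  set E1 := P.map (fun p => p.2 + 1) with hE1
  have harr : (PySem.List.pyRange 0 N).foldl
      (fun (d : PySem.Dict Int Int) k =>
        let p := PySem.List.pyGetD lines k (0, 0)
        let d := d.insert p.1 (d.getD p.1 0 + 1)
        d.insert (p.2 + 1) (d.getD (p.2 + 1) 0 - 1)) PySem.Dict.empty
      = P.foldl stepA PySem.Dict.empty := by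
    rw [hP, ← pyRange_extract lines N h, List.foldl_map]
    rfl
  unfold maxIntersections
  rw [harr]
  set arr := P.foldl stepA PySem.Dict.empty with harr'
  have hgetd : ∀ x, arr.getD x 0 = (S.count x : Int) - (E1.count x : Int) := by
    intro x
    rw [harr', dictA_getD, PySem.Dict.getD_empty]
    simp [hS, hE1]
  have hnodupkeys : arr.keys.Nodup := dictA_nodup P _ (by simp [PySem.Dict.keys_empty])
  have hmemkeys : ∀ x, x ∈ arr.keys ↔ x ∈ S ∨ x ∈ E1 := by
    intro x
    rw [harr', dictA_mem, PySem.Dict.keys_empty]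
    simp [hS, hE1]
  set K := PySem.List.sorted arr.keys (fun x => x) with hK
  have hKperm : K.Perm arr.keys := PySem.List.sorted_perm _ _ _
  have hKnd : K.Nodup := hKperm.nodup_iff.mpr hnodupkeys
  have hKle : K.Pairwise (· ≤ ·) := PySem.List.sorted_pairwise _ _
  have hKlt : K.Pairwise (· < ·) := by
    have hne : K.Pairwise (· ≠ ·) := hKnd
    exact (hKle.and hne).imp (fun h => lt_of_le_of_ne h.1 h.2)
  have hKmem : ∀ x, x ∈ K ↔ x ∈ S ∨ x ∈ E1 := by
    intro x; rw [hKperm.mem_iff]; exact hmemkeys x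
  -- second loop
  have hloop := sweepA_eq (fun k => arr.getD k 0) K [] 0 (by simpa using hKlt)
  have hinit : (sumv (fun k => arr.getD k 0) []) = 0 := by simp [sumv]
  rw [hinit] at hloop
  simp only [List.nil_append] at hloop
  have hstep : (K.foldl (fun (s : Int × Int) k =>
        let t := s.2 + arr.getD k 0
        (max s.1 t, t)) (0, 0)).1
      = K.foldl (fun a' k => max a' (sumv (fun k => arr.getD k 0) (K.filter (fun y => y ≤ k)))) 0 := by
    rw [← hloop]
  rw [hstep]
  -- evaluate the prefix sums
  have hsum : ∀ x, sumv (fun k => arr.getD k 0) (K.filter (fun y => y ≤ x)) = pvF S E1 x := by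
    intro x
    unfold sumv pvF
    have hv : (K.filter (fun y => y ≤ x)).map (fun k => arr.getD k 0)
        = (K.filter (fun y => y ≤ x)).map (fun k => (S.count k : Int) + (-(E1.count k : Int))) := by
      apply List.map_congr_left
      intro y _
      rw [hgetd y]; omega
    rw [hv, PySem.List.sum_map_add_int, sum_count_filter K S x hKnd (fun s hs => (hKmem s).mpr (Or.inl hs))]
    have : ((K.filter (fun y => y ≤ x)).map (fun k => -(E1.count k : Int))).sum
        = -(((K.filter (fun y => y ≤ x)).map (fun k => (E1.count k : Int))).sum) := by
      induction (K.filter (fun y => y ≤ x)) with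
      | nil => simp
      | cons z t ih => simp [ih]; omega
    rw [this, sum_count_filter K E1 x hKnd (fun s hs => (hKmem s).mpr (Or.inr hs))]
    omega
  have hfun : (fun (a' : Int) k => max a' (sumv (fun k => arr.getD k 0) (K.filter (fun y => y ≤ k))))
      = fun (a' : Int) k => max a' (pvF S E1 k) := by
    funext a' k; rw [hsum]
  rw [hfun]
  exact best_congr S E1 K S
    (fun x _ => pvF_le_best S E1 S (fun s hs => hs) x)
    (fun x hx => (PySem.List.le_foldl_max_int K _ 0).2 x ((hKmem x).mpr (Or.inl hx)))

lemma thmB (lines : List (Int × Int)) (N : Int) (h : N ≤ (lines.length : Int)) :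
    maxIntersections_alt lines N =
      (lines.take N.toNat |>.map Prod.fst).foldl
        (fun a s => max a (pvF (lines.take N.toNat |>.map Prod.fst)
                               (lines.take N.toNat |>.map (fun p => p.2 + 1)) s)) 0 := by
  set P := lines.take N.toNat with hP
  set S := P.map Prod.fst with hS
  set E := P.map Prod.snd with hE
  set E1 := P.map (fun p => p.2 + 1) with hE1
  have h1 : (PySem.List.pyRange 0 N).map (fun k => (PySem.List.pyGetD lines k (0, 0)).1) = S := by
    rw [hS, hP, ← pyRange_extract lines N h, List.map_map]; rfl
  have h2 : (PySem.List.pyRange 0 N).map (fun k => (PySem.List.pyGetD lines k (0, 0)).2) = E := by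
    rw [hE, hP, ← pyRange_extract lines N h, List.map_map]; rfl
  unfold maxIntersections_alt
  rw [h1, h2]
  set ss := PySem.List.sorted S (fun x => x) with hss'
  set es := PySem.List.sorted E (fun x => x) with hes'
  have hssp : ss.Perm S := PySem.List.sorted_perm _ _ _
  have hesp : es.Perm E := PySem.List.sorted_perm _ _ _
  have hsspw : ss.Pairwise (· ≤ ·) := PySem.List.sorted_pairwise _ _
  have hespw : es.Pairwise (· ≤ ·) := PySem.List.sorted_pairwise _ _
  have hlen : es.length = ss.length := by
    rw [hssp.length_eq, hesp.length_eq, hS, hE]; simp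
  rw [sweep_eq ss es hsspw hespw hlen 0 0 0 0 (by omega) (by omega) (by omega) (by omega)]
  have h0 : ss.length - 0 = ss.length := by omega
  rw [h0, idxmax_eq_elemmax ss es hsspw]
  -- convert counts
  have hcnt : ∀ s, cntLe ss s - cntLt es s = pvF S E1 s := by
    intro s
    unfold pvF
    have ha : cntLe ss s = cntLe S s := by unfold cntLe; rw [hssp.countP_eq]
    have hb : cntLt es s = cntLe E1 s := by
      unfold cntLt cntLe
      rw [hesp.countP_eq, hE, hE1, hP]
      rw [List.countP_map, List.countP_map]
      congr 1
    rw [ha, hb]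
  have hfun : (fun (a : Int) s => max a (cntLe ss s - cntLt es s)) = fun (a : Int) s => max a (pvF S E1 s) := by
    funext a s; rw [hcnt]
  rw [hfun]
  exact best_congr S E1 ss S
    (fun x _ => pvF_le_best S E1 S (fun s hs => hs) x)
    (fun x hx => (PySem.List.le_foldl_max_int ss _ 0).2 x (hssp.mem_iff.mpr hx))


-- ===== VERDICT (by name: the statement is the Claim_ definition above) =====
theorem maxIntersections_spec : Claim_equal_maxIntersections := by
  intro lines N _ hpre
  unfold Spec_maxIntersections
  rw [thmA lines N hpre, thmB lines N hpre]
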